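-- pv_equiv track=rewrite | github.com/simonw/research | string-redaction-library/redactor.py | max_same_type_sequence
-- ===== SOURCE A (Python) =====
-- def max_same_type_sequence(text: str) -> int:
--     """Find longest sequence of same character type (vowels or consonants)."""
--     max_seq = 0
--     current_seq = 0
--     last_type = None
--
--     for c in text.lower():
--         if c.isalpha():
--             is_vowel = c in "aeiou"
--             if last_type == is_vowel:
--                 current_seq += 1
--             else:
--                 current_seq = 1
--                 last_type = is_vowel
--             max_seq = max(max_seq, current_seq)
--         else:
--             current_seq = 0
--             last_type = None
--
--     return max_seq
-- ===== SOURCE B (Python) =====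
-- from itertools import groupby
--
--
-- def max_same_type_sequence(text: str) -> int:
--     """Find longest sequence of same character type (vowels or consonants)."""
--     def type_key(c):
--         if not c.isalpha():
--             return None
--         return c in "aeiou"
--
--     return max(
--         (sum(1 for _ in group) for key, group in groupby(text.lower(), type_key) if key is not None),
--         default=0,
--     )
-- ===== Notes on version B (the rewrite author's own statement) =====
-- stated objective: idiomatic
-- what changed: Replaces the hand-rolled state machine (max_seq/current_seq/last_type) by itertools.groupby over a vowel/consonant/None key function: take the max length over the non-None groups with default=0.
import Mathlib
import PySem

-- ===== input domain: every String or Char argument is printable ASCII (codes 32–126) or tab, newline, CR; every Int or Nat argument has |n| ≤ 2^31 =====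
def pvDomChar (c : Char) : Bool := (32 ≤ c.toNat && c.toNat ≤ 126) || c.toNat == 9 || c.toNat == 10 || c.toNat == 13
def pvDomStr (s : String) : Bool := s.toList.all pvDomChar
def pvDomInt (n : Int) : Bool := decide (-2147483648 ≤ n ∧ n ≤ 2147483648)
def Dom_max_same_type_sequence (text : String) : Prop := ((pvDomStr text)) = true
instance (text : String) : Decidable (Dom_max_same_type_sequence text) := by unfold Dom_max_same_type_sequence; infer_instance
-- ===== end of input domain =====

-- B replaces A's hand-rolled state machine by a groupby-style decomposition (idiomatic): key each
-- character as vowel/consonant/non-alpha, group consecutive equal keys, take the max alpha-group length.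

-- ===== PORT A =====
-- A's loop: state (max_seq, current_seq, last_type), one step per character of text.lower()
def pvALoop : List Char → Int → Int → Option Bool → Int
  | [], maxSeq, _, _ => maxSeq
  | ch :: rest, maxSeq, curSeq, lastType =>
    if PySem.Chars.isalpha ch then
      let isVowel := PySem.Chars.isIn [ch] ['a', 'e', 'i', 'o', 'u']
      if lastType == some isVowel then
        pvALoop rest (max maxSeq (curSeq + 1)) (curSeq + 1) lastType
      else
        pvALoop rest (max maxSeq 1) 1 (some isVowel)
    else
      pvALoop rest maxSeq 0 none

def max_same_type_sequence (text : String) : Int :=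
  pvALoop (PySem.Str.lower text).toList 0 0 none

-- ===== PORT B =====
-- Source B's type_key: None for non-alpha, else whether the character is a vowel
def pvTypeKey (ch : Char) : Option Bool :=
  if PySem.Chars.isalpha ch then some (PySem.Chars.isIn [ch] ['a', 'e', 'i', 'o', 'u']) else none

-- itertools.groupby: list of (key, group length) for maximal runs of equal keys
def pvGroups : List (Option Bool) → List (Option Bool × Int)
  | [] => []
  | k :: ks =>
    (k, 1 + ((ks.takeWhile (· == k)).length : Int)) :: pvGroups (ks.dropWhile (· == k))
termination_by ks => ks.length
decreasing_by
  exact Nat.lt_of_le_of_lt (List.length_dropWhile_le _ _) (Nat.lt_succ_self _)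

-- max(..., default=0) over the lengths of the groups whose key is not None
def pvStep (acc : Int) (g : Option Bool × Int) : Int :=
  if g.1.isSome then max acc g.2 else acc

def max_same_type_sequence_alt (text : String) : Int :=
  (pvGroups ((PySem.Str.lower text).toList.map pvTypeKey)).foldl pvStep 0

-- ===== PRECONDITION & SPEC =====
def Spec_max_same_type_sequence (text : String) (out : Int) : Prop := out = max_same_type_sequence_alt text
instance (text : String) (out : Int) : Decidable (Spec_max_same_type_sequence text out) := by unfold Spec_max_same_type_sequence; infer_instance

-- ===== CLAIM (what is proved, stated in full; the proofs are below) =====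
def Claim_equal_max_same_type_sequence : Prop := ∀ (text : String), Dom_max_same_type_sequence text → Spec_max_same_type_sequence text (max_same_type_sequence text)

-- ===== LEMMAS AND PROOFS =====

-- "future contribution" of A's loop from state (current_seq, last_type), over the key sequence
def pvCont : Int → Option Bool → List (Option Bool) → Int
  | _, _, [] => 0
  | _, _, none :: ks => pvCont 0 none ks
  | c, l, some v :: ks =>
    if l == some v then max (c + 1) (pvCont (c + 1) (some v) ks)
    else max 1 (pvCont 1 (some v) ks)

lemma pvCont_nonneg (ks : List (Option Bool)) : ∀ (c : Int) (l : Option Bool), 0 ≤ pvCont c l ks := by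
  induction ks with
  | nil => intro c l; simp [pvCont]
  | cons k t ih =>
    intro c l
    cases k with
    | none => simpa [pvCont] using ih 0 none
    | some v =>
      by_cases h : l == some v
      · simp only [pvCont, h, if_pos]
        exact le_trans (ih (c + 1) (some v)) (le_max_right _ _)
      · simp only [pvCont, h, if_neg, Bool.false_eq_true, not_false_iff]
        exact le_trans (ih 1 (some v)) (le_max_right _ _)

-- A's loop equals max of the accumulator and the future contribution
lemma pvALoop_eq_cont (chs : List Char) :
    ∀ (m c : Int) (l : Option Bool), 0 ≤ m →
      pvALoop chs m c l = max m (pvCont c l (chs.map pvTypeKey)) := by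
  induction chs with
  | nil => intro m c l hm; simp [pvALoop, pvCont]; omega
  | cons ch rest ih =>
    intro m c l hm
    by_cases ha : PySem.Chars.isalpha ch
    · simp only [pvALoop, ha, if_pos, List.map_cons, pvTypeKey]
      by_cases hl : l == some (PySem.Chars.isIn [ch] ['a', 'e', 'i', 'o', 'u'])
      · have hl' : l = some (PySem.Chars.isIn [ch] ['a', 'e', 'i', 'o', 'u']) := by
          exact eq_of_beq hl
        rw [if_pos hl, hl']
        rw [ih (max m (c + 1)) (c + 1) _ (le_trans hm (le_max_left _ _))]
        simp only [pvCont, beq_self_eq_true, if_pos]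
        omega
      · rw [if_neg (by simpa using hl)]
        rw [ih (max m 1) 1 _ (le_trans hm (le_max_left _ _))]
        simp only [pvCont, hl, Bool.false_eq_true, if_neg, not_false_iff]
        omega
    · simp only [pvALoop, ha, Bool.false_eq_true, if_neg, not_false_iff, List.map_cons, pvTypeKey]
      rw [ih m 0 none hm]
      simp [pvCont]
  
-- foldl over pvStep with a max accumulator splits
lemma pvFoldl_shift (gs : List (Option Bool × Int)) :
    ∀ (a b : Int), gs.foldl pvStep (max a b) = max a (gs.foldl pvStep b) := by
  induction gs with
  | nil => intro a b; simp
  | cons g t ih =>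
    intro a b
    rcases g with ⟨k, n⟩
    cases k with
    | none => simp only [List.foldl_cons, pvStep, Option.isSome_none, Bool.false_eq_true,
        if_neg, not_false_iff]; exact ih a b
    | some v =>
      simp only [List.foldl_cons, pvStep, Option.isSome_some, if_pos]
      rw [max_assoc, ih a (max b n)]

-- skipping a leading run of None keys does not change the contribution
lemma pvCont_dropNone (ks : List (Option Bool)) :
    pvCont 0 none (ks.dropWhile (· == (none : Option Bool))) = pvCont 0 none ks := by
  induction ks with
  | nil => rfl
  | cons k t ih =>
    cases k with
    | none => simpa [List.dropWhile, pvCont] using ih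
    | some v => simp [List.dropWhile]

-- a leading run of `some v` keys contributes its full length
lemma pvCont_run (ks : List (Option Bool)) :
    ∀ (c : Int) (v : Bool), 0 ≤ c →
      max c (pvCont c (some v) ks)
        = max (c + ((ks.takeWhile (· == (some v : Option Bool))).length : Int))
            (pvCont 0 none (ks.dropWhile (· == (some v : Option Bool)))) := by
  induction ks with
  | nil => intro c v hc; simp [pvCont]
  | cons k t ih =>
    intro c v hc
    by_cases h : k == (some v : Option Bool)
    · have hk : k = some v := eq_of_beq h
      subst hk
      simp only [List.takeWhile, List.dropWhile, h, pvCont, if_pos,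
        List.length_cons]
      have := ih (c + 1) v (by omega)
      have h0 := pvCont_nonneg t (c + 1) (some v)
      push_cast
      omega
    · have htk : (k :: t).takeWhile (· == (some v : Option Bool)) = [] := by
        simp [List.takeWhile, h]
      have hdk : (k :: t).dropWhile (· == (some v : Option Bool)) = k :: t := by
        simp [List.dropWhile, h]
      rw [htk, hdk]
      cases k with
      | none => simp [pvCont]
      | some v' =>
        have hne : v ≠ v' := by
          intro e; exact h (by simp [e])
        have h0 := pvCont_nonneg t 1 (some v')
        simp only [pvCont, beq_iff_eq, Option.some.injEq, hne, if_neg, not_false_iff,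
          List.length_nil, Int.natCast_zero, add_zero]
        simp

-- the contribution from the initial state is the groupby maximum
lemma pvCont_eq_groups : ∀ (n : Nat) (ks : List (Option Bool)), ks.length ≤ n →
    pvCont 0 none ks = (pvGroups ks).foldl pvStep 0 := by
  intro n
  induction n with
  | zero =>
    intro ks h
    have : ks = [] := List.eq_nil_of_length_eq_zero (Nat.le_zero.mp h)
    subst this; simp [pvGroups, pvCont]
  | succ n ih =>
    intro ks h
    cases ks with
    | nil => simp [pvGroups, pvCont]
    | cons k t =>
      have hdl : (t.dropWhile (· == k)).length ≤ n :=
        le_trans (List.length_dropWhile_le _ _) (Nat.le_of_succ_le_succ h)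
      cases k with
      | none =>
        rw [pvGroups]
        simp only [List.foldl_cons, pvStep, Option.isSome_none, Bool.false_eq_true, if_neg,
          not_false_iff]
        rw [← ih _ hdl, pvCont_dropNone t]
        rfl
      | some v =>
        rw [pvGroups]
        simp only [List.foldl_cons, pvStep, Option.isSome_some, if_pos]
        have h1 : pvCont 0 none (some v :: t) = max 1 (pvCont 1 (some v) t) := by
          simp [pvCont]
        rw [h1, pvCont_run t 1 v (by omega)]
        rw [max_comm (0 : Int) _, pvFoldl_shift, ← ih _ hdl]

-- ===== VERDICT (by name: the statement is the Claim_ definition above) =====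
theorem max_same_type_sequence_spec : Claim_equal_max_same_type_sequence := by
  intro text _
  unfold Spec_max_same_type_sequence max_same_type_sequence max_same_type_sequence_alt
  rw [pvALoop_eq_cont _ 0 0 none le_rfl,
    pvCont_eq_groups ((PySem.Str.lower text).toList.map pvTypeKey).length _ le_rfl]
  have := pvCont_nonneg ((PySem.Str.lower text).toList.map pvTypeKey) 0 none
  rw [pvCont_eq_groups ((PySem.Str.lower text).toList.map pvTypeKey).length _ le_rfl] at this
  omega
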